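-- pv_equiv track=rewrite | github.com/jclements3/HarpHymnal | trefoil/reharm/satb_baseline.py | _dedup_events
-- ===== SOURCE A (Python) =====
-- def _dedup_events(
--     events: list[tuple[int, int, int, int, str]],
--     tick_window: int = 10,
-- ) -> list[tuple[int, int, int, int, str]]:
--     """Collapse near-simultaneous unisons across voices.
--
--     If two events share a pitch and their ticks differ by less than
--     ``tick_window`` (default 10 ticks ≈ 5 ms at 480 tpq / 120 bpm), keep
--     the louder one; merge durations to the longer of the two.
--     """
--     # Sort by (pitch, tick) so duplicates land adjacent.
--     events_sorted = sorted(events, key=lambda ev: (ev[1], ev[0]))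
--     kept: list[tuple[int, int, int, int, str]] = []
--     for ev in events_sorted:
--         tick, pitch, dur, vel, src = ev
--         if kept:
--             p_tick, p_pitch, p_dur, p_vel, p_src = kept[-1]
--             if p_pitch == pitch and abs(tick - p_tick) < tick_window:
--                 new_vel = max(p_vel, vel)
--                 # Span the full sustain of both events.
--                 end = max(p_tick + p_dur, tick + dur)
--                 new_tick = min(p_tick, tick)
--                 kept[-1] = (new_tick, pitch, end - new_tick, new_vel, p_src or src)
--                 continue
--         kept.append(ev)
--     # Re-sort by tick for stable downstream behaviour.
--     kept.sort(key=lambda ev: (ev[0], ev[1]))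
--     return kept
-- ===== SOURCE B (Python) =====
-- def _dedup_events(
--     events: list[tuple[int, int, int, int, str]],
--     tick_window: int = 10,
-- ) -> list[tuple[int, int, int, int, str]]:
--     """Collapse near-simultaneous unisons across voices.
--
--     For each pitch (in first-encounter order) take its events in tick order
--     and consume them run by run: a run starts at some event and greedily
--     absorbs the following events whose tick is within tick_window of the
--     run's start, keeping the max end, max velocity and first non-empty src.
--     Finally everything is sorted by (tick, pitch).
--     """
--     pitches: list[int] = []
--     for ev in events:
--         if ev[1] not in pitches:
--             pitches.append(ev[1])
--     out: list[tuple[int, int, int, int, str]] = []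
--     for p in pitches:
--         bucket = sorted([e for e in events if e[1] == p], key=lambda e: e[0])
--         i = 0
--         n = len(bucket)
--         while i < n:
--             tick, pitch, dur, vel, src = bucket[i]
--             end = tick + dur
--             i += 1
--             while i < n and abs(bucket[i][0] - tick) < tick_window:
--                 t2, _, d2, v2, s2 = bucket[i]
--                 end = max(end, t2 + d2)
--                 vel = max(vel, v2)
--                 src = src or s2
--                 i += 1
--             out.append((tick, pitch, end - tick, vel, src))
--     out.sort(key=lambda ev: (ev[0], ev[1]))
--     return out
-- ===== Notes on version B (the rewrite author's own statement) =====
-- stated objective: alternative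
-- what changed: B collects the distinct pitches in first-encounter order, and for each pitch consumes its tick-sorted events run by run with a nested greedy loop (absorbing events within tick_window of the run's start), then sorts the union once by (tick, pitch) - instead of A's single global (pitch, tick) sort followed by a flat adjacent-pair pass that rewrites kept[-1].
import Mathlib
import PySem

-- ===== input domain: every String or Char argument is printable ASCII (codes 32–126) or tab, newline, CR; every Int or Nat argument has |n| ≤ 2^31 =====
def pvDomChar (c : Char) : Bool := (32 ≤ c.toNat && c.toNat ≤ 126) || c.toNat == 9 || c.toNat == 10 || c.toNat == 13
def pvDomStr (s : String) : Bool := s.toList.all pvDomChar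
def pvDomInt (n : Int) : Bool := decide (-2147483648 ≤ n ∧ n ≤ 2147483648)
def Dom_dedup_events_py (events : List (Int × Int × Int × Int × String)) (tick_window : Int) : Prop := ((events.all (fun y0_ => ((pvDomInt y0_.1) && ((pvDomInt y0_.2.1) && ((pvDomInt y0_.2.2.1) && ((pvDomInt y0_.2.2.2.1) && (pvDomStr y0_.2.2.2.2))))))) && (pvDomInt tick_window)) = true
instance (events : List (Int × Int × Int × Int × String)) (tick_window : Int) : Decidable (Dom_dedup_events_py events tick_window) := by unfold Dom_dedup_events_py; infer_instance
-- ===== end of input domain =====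

-- B rewrites A's global (pitch, tick) sort + flat adjacent pass as: distinct pitches in
-- first-encounter order, a nested greedy run-consuming loop per tick-sorted pitch bucket,
-- one final (tick, pitch) sort; objective: alternative decomposition (same value).

-- ===== PORT A =====
-- one step of A's loop; the accumulator is A's `kept` held in REVERSED order (kept[-1] = head)
def pvStepA (tw : Int) (kept : List (Int × Int × Int × Int × String))
    (ev : Int × Int × Int × Int × String) : List (Int × Int × Int × Int × String) :=
  match kept with
  | p :: rest =>
      if p.2.1 == ev.2.1 && decide (|ev.1 - p.1| < tw) then
        let new_vel := max p.2.2.2.1 ev.2.2.2.1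
        let e := max (p.1 + p.2.2.1) (ev.1 + ev.2.2.1)
        let new_tick := min p.1 ev.1
        -- `p_src or src` on strings: p_src if nonempty else src
        (new_tick, ev.2.1, e - new_tick, new_vel,
          if p.2.2.2.2 == "" then ev.2.2.2.2 else p.2.2.2.2) :: rest
      else ev :: p :: rest
  | [] => [ev]

def dedup_events_py (events : List (Int × Int × Int × Int × String)) (tick_window : Int) :
    List (Int × Int × Int × Int × String) :=
  let events_sorted := PySem.List.sorted2 events (fun e => e.2.1) (fun e => e.1)
  let kept := (events_sorted.foldl (pvStepA tick_window) []).reverse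
  PySem.List.sorted2 kept (fun e => e.1) (fun e => e.2.1)

-- ===== PORT B =====
-- B's inner `while` loop: absorb events within tick_window of the run's start tick;
-- returns the finished run and the unconsumed remainder of the bucket
def pvRun (tw tick pitch endv vel : Int) (src : String) :
    List (Int × Int × Int × Int × String) →
      (Int × Int × Int × Int × String) × List (Int × Int × Int × Int × String)
  | [] => ((tick, pitch, endv - tick, vel, src), [])
  | x :: rest =>
      if decide (|x.1 - tick| < tw) then
        pvRun tw tick pitch (max endv (x.1 + x.2.2.1)) (max vel x.2.2.2.1)
          (if src == "" then x.2.2.2.2 else src) rest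
      else ((tick, pitch, endv - tick, vel, src), x :: rest)

theorem pvRun_rem_le (tw : Int) :
    ∀ (l : List (Int × Int × Int × Int × String)) (tick pitch endv vel : Int) (src : String),
      (pvRun tw tick pitch endv vel src l).2.length ≤ l.length := by
  intro l
  induction l with
  | nil => intro _ _ _ _ _; simp [pvRun]
  | cons x rest ih =>
    intro tick pitch endv vel src
    simp only [pvRun]
    split
    · exact le_trans (ih _ _ _ _ _) (Nat.le_succ _)
    · simp

-- B's outer `while` loop over one tick-sorted pitch bucket
def pvRuns (tw : Int) : List (Int × Int × Int × Int × String) → List (Int × Int × Int × Int × String)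
  | [] => []
  | e :: rest =>
      let pr := pvRun tw e.1 e.2.1 (e.1 + e.2.2.1) e.2.2.2.1 e.2.2.2.2 rest
      pr.1 :: pvRuns tw pr.2
termination_by l => l.length
decreasing_by
  exact Nat.lt_succ_of_le (pvRun_rem_le tw rest e.1 e.2.1 (e.1 + e.2.2.1) e.2.2.2.1 e.2.2.2.2)

def dedup_events_py_alt (events : List (Int × Int × Int × Int × String)) (tick_window : Int) :
    List (Int × Int × Int × Int × String) :=
  -- pitches = []; for ev in events: if ev[1] not in pitches: pitches.append(ev[1])
  let pitches := events.foldl (fun ps ev => PySem.Set.add ps ev.2.1) PySem.Set.empty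
  -- for p in pitches: bucket = sorted(filter); runs loop; out.extend
  let out := pitches.flatMap (fun p =>
    pvRuns tick_window (PySem.List.sorted (events.filter (fun e => e.2.1 == p)) (fun e => e.1)))
  PySem.List.sorted2 out (fun e => e.1) (fun e => e.2.1)

-- ===== PRECONDITION & SPEC =====
def Spec_dedup_events_py (events : List (Int × Int × Int × Int × String)) (tick_window : Int) (out : List (Int × Int × Int × Int × String)) : Prop := out = dedup_events_py_alt events tick_window
instance (events : List (Int × Int × Int × Int × String)) (tick_window : Int) (out : List (Int × Int × Int × Int × String)) : Decidable (Spec_dedup_events_py events tick_window out) := by unfold Spec_dedup_events_py; infer_instance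

-- ===== CLAIM (what is proved, stated in full; the proofs are below) =====
def Claim_equal_dedup_events_py : Prop := ∀ (events : List (Int × Int × Int × Int × String)) (tick_window : Int), Dom_dedup_events_py events tick_window → Spec_dedup_events_py events tick_window (dedup_events_py events tick_window)

-- ===== LEMMAS AND PROOFS =====

-- abbreviations for the two sort keys (lexicographic pairs)
def pvKPT (e : Int × Int × Int × Int × String) : Lex (Int × Int) := toLex (e.2.1, e.1)
def pvKTP (e : Int × Int × Int × Int × String) : Lex (Int × Int) := toLex (e.1, e.2.1)

theorem pvSorted2_eq {α : Type} (xs : List α) (k1 k2 : α → Int) :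
    PySem.List.sorted2 xs k1 k2 = PySem.List.sorted xs (fun e => toLex (k1 e, k2 e)) := by
  have hb : (fun (a b : α) => decide (k1 a < k1 b) || (!decide (k1 b < k1 a) && decide (k2 a < k2 b)))
      = (fun a b => decide ((fun e => toLex (k1 e, k2 e)) a < (fun e => toLex (k1 e, k2 e)) b)) := by
    funext a b
    rcases lt_trichotomy (k1 a) (k1 b) with h|h|h
    · simp [Prod.Lex.toLex_lt_toLex, h, lt_asymm h]
    · simp [Prod.Lex.toLex_lt_toLex, h]
    · simp [Prod.Lex.toLex_lt_toLex, h, lt_asymm h, h.ne']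
  simp only [PySem.List.sorted2, PySem.List.sorted, Bool.false_eq_true, ite_false, hb]

theorem pvInsertBy_nil {α : Type} (bf : α → α → Bool) (x : α) : PySem.List.insertBy bf x [] = [x] := rfl
theorem pvInsertBy_cons {α : Type} (bf : α → α → Bool) (x y : α) (ys : List α) :
    PySem.List.insertBy bf x (y :: ys) = if bf x y then x :: y :: ys else y :: PySem.List.insertBy bf x ys := rfl

theorem pvPairwiseFilterExt {α κ : Type} [LinearOrder κ] (K : α → κ) :
    ∀ (m1 m2 : List α), m1.Pairwise (fun a b => K a ≤ K b) → m2.Pairwise (fun a b => K a ≤ K b) →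
      (∀ c, m1.filter (fun e => decide (K e = c)) = m2.filter (fun e => decide (K e = c))) →
      m1 = m2 := by
  intro m1
  induction m1 with
  | nil =>
    intro m2 _ _ hf
    cases m2 with
    | nil => rfl
    | cons b t2 =>
      have h := hf (K b)
      simp at h
  | cons a t1 ih =>
    intro m2 hp1 hp2 hf
    cases m2 with
    | nil =>
      have h := hf (K a)
      simp at h
    | cons b t2 =>
      have hab : K a = K b := by
        by_contra hne
        have h1 := hf (K a)
        have h2 := hf (K b)
        have ha2 : a ∈ b :: t2 := by
          have : a ∈ ((b :: t2).filter (fun e => decide (K e = K a))) := by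
            rw [← h1]; simp [List.mem_filter]
          exact List.mem_of_mem_filter this
        have hb1 : b ∈ a :: t1 := by
          have : b ∈ ((a :: t1).filter (fun e => decide (K e = K b))) := by
            rw [h2]; simp [List.mem_filter]
          exact List.mem_of_mem_filter this
        have hle1 : K b ≤ K a := by
          rcases List.mem_cons.1 ha2 with h|h
          · exact le_of_eq (by rw [h])
          · exact (List.pairwise_cons.1 hp2).1 a h
        have hle2 : K a ≤ K b := by
          rcases List.mem_cons.1 hb1 with h|h
          · exact le_of_eq (by rw [h])
          · exact (List.pairwise_cons.1 hp1).1 b h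
        exact hne (le_antisymm hle2 hle1)
      have hfa := hf (K b)
      simp [hab] at hfa
      have hab' : a = b := hfa.1
      subst hab'
      have htails : ∀ c, t1.filter (fun e => decide (K e = c)) = t2.filter (fun e => decide (K e = c)) := by
        intro c
        have := hf c
        by_cases hc : K a = c
        · simp only [List.filter_cons, hc, decide_true, if_true] at this
          exact List.tail_eq_of_cons_eq this
        · simpa only [List.filter_cons, hc, decide_false, if_false] using this
      have := ih t2 (List.pairwise_cons.1 hp1).2 (List.pairwise_cons.1 hp2).2 htails
      rw [this]

theorem pvInsertBy_filter {α κ : Type} [LinearOrder κ] (K : α → κ) (x : α) (c : κ) :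
    ∀ (s : List α), s.Pairwise (fun a b => K a ≤ K b) →
      (PySem.List.insertBy (fun a b => decide (K a < K b)) x s).filter (fun e => decide (K e = c)) =
        s.filter (fun e => decide (K e = c)) ++ (if K x = c then [x] else []) := by
  intro s
  induction s with
  | nil =>
    intro _
    rw [pvInsertBy_nil]
    by_cases hc : K x = c <;> simp [hc]
  | cons y ys ih =>
    intro hp
    rw [pvInsertBy_cons]
    by_cases hlt : K x < K y
    · rw [if_pos (by simpa using hlt)]
      by_cases hc : K x = c
      · have hnil : (y :: ys).filter (fun e => decide (K e = c)) = [] := by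
          rw [List.filter_eq_nil_iff]
          intro e he
          have hy : K y ≤ K e := by
            rcases List.mem_cons.1 he with h|h
            · exact le_of_eq (by rw [h])
            · exact (List.pairwise_cons.1 hp).1 e h
          have : K x < K e := lt_of_lt_of_le hlt hy
          simp only [decide_eq_true_eq]
          intro hec
          exact absurd (hc ▸ hec : K e = K x) (ne_of_gt this)
        simp [hc, hnil]
      · simp [hc]
    · rw [if_neg (by simpa using hlt)]
      rw [List.filter_cons, List.filter_cons, ih (List.pairwise_cons.1 hp).2]
      by_cases hy : K y = c <;> simp [hy]

theorem pvSorted_filter {α κ : Type} [LinearOrder κ] (K : α → κ) (l : List α) (c : κ) :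
    (PySem.List.sorted l K).filter (fun e => decide (K e = c)) = l.filter (fun e => decide (K e = c)) := by
  induction l using List.reverseRecOn with
  | nil => rfl
  | append_singleton l x ih =>
    have hs : PySem.List.sorted (l ++ [x]) K =
        PySem.List.insertBy (fun a b => decide (K a < K b)) x (PySem.List.sorted l K) := by
      rw [PySem.List.sorted_eq_foldl_insertBy, List.foldl_append,
        ← PySem.List.sorted_eq_foldl_insertBy]
      rfl
    rw [hs, pvInsertBy_filter K x c _ (PySem.List.sorted_pairwise l K), ih, List.filter_append]
    by_cases hc : K x = c <;> simp [hc]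

-- proof-side helper: A's step specialised to a homogeneous block (pitch check always true)
def pvStepH (tw : Int) (merged : List (Int × Int × Int × Int × String))
    (ev : Int × Int × Int × Int × String) : List (Int × Int × Int × Int × String) :=
  match merged with
  | p :: rest =>
      if decide (|ev.1 - p.1| < tw) then
        (min p.1 ev.1, ev.2.1, max (p.1 + p.2.2.1) (ev.1 + ev.2.2.1) - min p.1 ev.1,
          max p.2.2.2.1 ev.2.2.2.1,
          if p.2.2.2.2 == "" then ev.2.2.2.2 else p.2.2.2.2) :: rest
      else ev :: p :: rest
  | [] => [ev]

theorem pvStepH_ne_nil (tw : Int) (s : List (Int × Int × Int × Int × String)) (x : Int × Int × Int × Int × String) :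
    pvStepH tw s x ≠ [] := by
  cases s with
  | nil => simp [pvStepH]
  | cons p rest => simp only [pvStepH]; split <;> simp

theorem pvFoldH_ne_nil (tw : Int) (l : List (Int × Int × Int × Int × String)) :
    ∀ (s : List (Int × Int × Int × Int × String)), s ≠ [] → l.foldl (pvStepH tw) s ≠ [] := by
  induction l with
  | nil => intro s hs; simpa using hs
  | cons x l ih => intro s _; exact ih (pvStepH tw s x) (pvStepH_ne_nil tw s x)

theorem pvStepH_pitch (tw : Int) (p : Int) (s : List (Int × Int × Int × Int × String))
    (x : Int × Int × Int × Int × String) (hx : x.2.1 = p) (hs : ∀ e ∈ s, e.2.1 = p) :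
    ∀ e ∈ pvStepH tw s x, e.2.1 = p := by
  cases s with
  | nil => simpa [pvStepH] using hx
  | cons q rest =>
    simp only [pvStepH]
    split
    · intro e he
      rcases List.mem_cons.1 he with h|h
      · rw [h]; exact hx
      · exact hs e (List.mem_cons_of_mem q h)
    · intro e he
      rcases List.mem_cons.1 he with h|h
      · rw [h]; exact hx
      · exact hs e h

theorem pvFoldH_pitch (tw : Int) (p : Int) (l : List (Int × Int × Int × Int × String)) :
    ∀ (s : List (Int × Int × Int × Int × String)), (∀ e ∈ l, e.2.1 = p) → (∀ e ∈ s, e.2.1 = p) →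
      ∀ e ∈ l.foldl (pvStepH tw) s, e.2.1 = p := by
  induction l with
  | nil => intro s _ hs; simpa using hs
  | cons x l ih =>
    intro s hl hs
    exact ih (pvStepH tw s x) (fun e he => hl e (List.mem_cons_of_mem x he))
      (pvStepH_pitch tw p s x (hl x List.mem_cons_self) hs)

theorem pvStepA_eq_stepH (tw : Int) (p : Int) (s acc : List (Int × Int × Int × Int × String))
    (x : Int × Int × Int × Int × String) (hsne : s ≠ []) (hx : x.2.1 = p) (hs : ∀ e ∈ s, e.2.1 = p) :
    pvStepA tw (s ++ acc) x = pvStepH tw s x ++ acc := by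
  cases s with
  | nil => exact absurd rfl hsne
  | cons q rest =>
    have hq : q.2.1 = x.2.1 := by rw [hs q List.mem_cons_self, hx]
    simp only [pvStepA, pvStepH, List.cons_append, hq, beq_self_eq_true, Bool.true_and]
    split <;> simp

theorem pvFoldA_eq_foldH (tw : Int) (p : Int) :
    ∀ (l s acc : List (Int × Int × Int × Int × String)), (∀ e ∈ l, e.2.1 = p) → s ≠ [] →
      (∀ e ∈ s, e.2.1 = p) →
      l.foldl (pvStepA tw) (s ++ acc) = l.foldl (pvStepH tw) s ++ acc := by
  intro l
  induction l with
  | nil => intro s acc _ _ _; rfl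
  | cons x l ih =>
    intro s acc hl hsne hs
    simp only [List.foldl_cons]
    rw [pvStepA_eq_stepH tw p s acc x hsne (hl x List.mem_cons_self) hs]
    exact ih (pvStepH tw s x) acc (fun e he => hl e (List.mem_cons_of_mem x he))
      (pvStepH_ne_nil tw s x)
      (pvStepH_pitch tw p s x (hl x List.mem_cons_self) hs)

theorem pvFoldA_block (tw : Int) (p : Int) (b acc : List (Int × Int × Int × Int × String))
    (hb : b ≠ []) (hhom : ∀ e ∈ b, e.2.1 = p) (hacc : ∀ h t, acc = h :: t → h.2.1 ≠ p) :
    b.foldl (pvStepA tw) acc = b.foldl (pvStepH tw) [] ++ acc := by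
  cases b with
  | nil => exact absurd rfl hb
  | cons x xs =>
    have hstep : pvStepA tw acc x = [x] ++ acc := by
      cases acc with
      | nil => rfl
      | cons h t =>
        have : (h.2.1 == x.2.1) = false := by
          have := hacc h t rfl
          rw [hhom x List.mem_cons_self]
          simpa using this
        simp [pvStepA, this]
    have hstep' : pvStepH tw [] x = [x] := rfl
    simp only [List.foldl_cons, hstep, hstep']
    exact pvFoldA_eq_foldH tw p xs [x] acc (fun e he => hhom e (List.mem_cons_of_mem x he))
      (by simp) (by intro e he; rcases List.mem_singleton.1 he with h; rw [h]; exact hhom x List.mem_cons_self)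

-- A's whole pass over a concatenation of homogeneous blocks with distinct pitches
theorem pvFoldA_flatMap (tw : Int) :
    ∀ (ps : List Int) (f : Int → List (Int × Int × Int × Int × String))
      (acc : List (Int × Int × Int × Int × String)),
      (∀ p ∈ ps, f p ≠ [] ∧ ∀ e ∈ f p, e.2.1 = p) → ps.Nodup →
      (∀ h t, acc = h :: t → h.2.1 ∉ ps) →
      (ps.flatMap f).foldl (pvStepA tw) acc =
        ps.reverse.flatMap (fun p => (f p).foldl (pvStepH tw) []) ++ acc := by
  intro ps
  induction ps with
  | nil => intro f acc _ _ _; simp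
  | cons p ps ih =>
    intro f acc hbl hnd hacc
    have hbp := hbl p List.mem_cons_self
    have hstep1 : (f p).foldl (pvStepA tw) acc = (f p).foldl (pvStepH tw) [] ++ acc :=
      pvFoldA_block tw p (f p) acc hbp.1 hbp.2
        (fun h t ht => fun hp => (hacc h t ht) (hp ▸ List.mem_cons_self))
    have hRne : (f p).foldl (pvStepH tw) [] ≠ [] := by
      cases hfp : f p with
      | nil => exact absurd hfp hbp.1
      | cons x xs =>
        simp only [List.foldl_cons]
        exact pvFoldH_ne_nil tw xs (pvStepH tw [] x) (pvStepH_ne_nil tw [] x)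
    have hRpitch : ∀ e ∈ (f p).foldl (pvStepH tw) [], e.2.1 = p :=
      pvFoldH_pitch tw p (f p) [] hbp.2 (by simp)
    have hmain := ih f ((f p).foldl (pvStepH tw) [] ++ acc)
      (fun q hq => hbl q (List.mem_cons_of_mem p hq)) (List.nodup_cons.1 hnd).2
      (by
        intro h t ht hmem
        have hh : h ∈ (f p).foldl (pvStepH tw) [] := by
          cases hR : (f p).foldl (pvStepH tw) [] with
          | nil => exact absurd hR hRne
          | cons r rs =>
            rw [hR] at ht
            simp only [List.cons_append, List.cons.injEq] at ht
            rw [← ht.1]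
            exact List.mem_cons_self
        have := hRpitch h hh
        exact (List.nodup_cons.1 hnd).1 (this ▸ hmem))
    simp only [List.flatMap_cons, List.foldl_append, hstep1, hmain, List.reverse_cons,
      List.flatMap_append, List.flatMap_cons, List.flatMap_nil, List.append_nil,
      List.append_assoc]

-- filtering a flatMap of pitch-homogeneous blocks by a pitch-pinning predicate
theorem pvFilter_flatMap (ps : List Int) (f : Int → List (Int × Int × Int × Int × String))
    (q : (Int × Int × Int × Int × String) → Bool) (p0 : Int)
    (hq : ∀ e, q e = true → e.2.1 = p0) (hf : ∀ p ∈ ps, ∀ e ∈ f p, e.2.1 = p) (hnd : ps.Nodup) :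
    (ps.flatMap f).filter q = if p0 ∈ ps then (f p0).filter q else [] := by
  induction ps with
  | nil => simp
  | cons p ps ih =>
    have ihq := ih (fun r hr => hf r (List.mem_cons_of_mem p hr)) (List.nodup_cons.1 hnd).2
    by_cases hp : p = p0
    · subst hp
      have hnot : p ∉ ps := (List.nodup_cons.1 hnd).1
      rw [if_neg hnot] at ihq
      simp [List.flatMap_cons, List.filter_append, ihq]
    · have hnil : (f p).filter q = [] := by
        rw [List.filter_eq_nil_iff]
        intro e he hqe
        exact hp ((hf p List.mem_cons_self e he) ▸ hq e hqe)
      by_cases hmem : p0 ∈ ps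
      · simp [List.flatMap_cons, List.filter_append, hnil, ihq, hmem, List.mem_cons]
      · have : p0 ∉ p :: ps := by
          simp [List.mem_cons, hmem]; intro h; exact absurd h.symm hp
        simp [List.flatMap_cons, List.filter_append, hnil, ihq, hmem, this]

-- the sorted list of distinct pitches of `events`
def pvPitches (events : List (Int × Int × Int × Int × String)) : List Int :=
  PySem.List.sorted (PySem.List.dedup (events.map (fun e => e.2.1))) (fun p => p)

-- one tick-sorted pitch bucket
def pvBucket (events : List (Int × Int × Int × Int × String)) (p : Int) :
    List (Int × Int × Int × Int × String) :=
  PySem.List.sorted (events.filter (fun e => e.2.1 == p)) (fun e => e.1)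

def pvMerged (tw : Int) (events : List (Int × Int × Int × Int × String)) (p : Int) :
    List (Int × Int × Int × Int × String) :=
  ((pvBucket events p).foldl (pvStepH tw) []).reverse

theorem pvPitches_nodup (events : List (Int × Int × Int × Int × String)) :
    (pvPitches events).Nodup := by
  rw [pvPitches]
  exact (PySem.List.sorted_perm (PySem.List.dedup (events.map (fun e => e.2.1))) (fun p => p)
    false).symm.nodup (PySem.List.nodup_dedup _)

theorem pvPitches_lt (events : List (Int × Int × Int × Int × String)) :
    (pvPitches events).Pairwise (· < ·) := by
  have hle : (pvPitches events).Pairwise (· ≤ ·) := by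
    rw [pvPitches]
    exact PySem.List.sorted_pairwise (PySem.List.dedup (events.map (fun e => e.2.1))) (fun p => p)
  exact (hle.and (pvPitches_nodup events)).imp (fun h => lt_of_le_of_ne h.1 h.2)

theorem pvPitches_mem (events : List (Int × Int × Int × Int × String)) (p : Int) :
    p ∈ pvPitches events ↔ p ∈ events.map (fun e => e.2.1) := by
  rw [pvPitches, PySem.List.mem_sorted, PySem.List.mem_dedup]

theorem pvBucket_pitch (events : List (Int × Int × Int × Int × String)) (p : Int) :
    ∀ e ∈ pvBucket events p, e.2.1 = p := by
  intro e he
  rw [pvBucket, PySem.List.mem_sorted] at he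
  simpa using (List.mem_filter.1 he).2

theorem pvBucket_ne_nil (events : List (Int × Int × Int × Int × String)) (p : Int)
    (hp : p ∈ pvPitches events) : pvBucket events p ≠ [] := by
  rw [pvPitches_mem] at hp
  obtain ⟨e, he, hpe⟩ := List.mem_map.1 hp
  intro hnil
  rw [pvBucket, PySem.List.sorted_eq_nil_iff] at hnil
  have : e ∈ events.filter (fun e => e.2.1 == p) := by
    rw [List.mem_filter]; exact ⟨he, by simp [hpe]⟩
  rw [hnil] at this
  exact absurd this (List.not_mem_nil)

-- pitch-homogeneous, tick-sorted blocks in increasing pitch order are (pitch, tick)-nondecreasing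
theorem pvFlatMap_pairwise (ps : List Int) (f : Int → List (Int × Int × Int × Int × String))
    (hlt : ps.Pairwise (· < ·)) (hhom : ∀ p, ∀ e ∈ f p, e.2.1 = p)
    (htick : ∀ p, (f p).Pairwise (fun a b => a.1 ≤ b.1)) :
    (ps.flatMap f).Pairwise (fun a b => pvKPT a ≤ pvKPT b) := by
  induction ps with
  | nil => simp
  | cons p ps ih =>
    simp only [List.flatMap_cons, List.pairwise_append]
    refine ⟨?_, ih (List.pairwise_cons.1 hlt).2, ?_⟩
    · refine List.Pairwise.imp_of_mem ?_ (htick p)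
      intro a b ha hb hle
      rw [pvKPT, pvKPT, Prod.Lex.toLex_le_toLex]
      right
      exact ⟨by rw [hhom p a ha, hhom p b hb], hle⟩
    · intro a ha b hb
      obtain ⟨q, hq, hbq⟩ := List.mem_flatMap.1 hb
      rw [pvKPT, pvKPT, Prod.Lex.toLex_le_toLex]
      left
      rw [hhom p a ha, hhom q b hbq]
      exact (List.pairwise_cons.1 hlt).1 q hq

-- the (pitch, tick)-sorted event list is the pitch blocks in pitch order
theorem pvSortPT_decomp (events : List (Int × Int × Int × Int × String)) :
    PySem.List.sorted events pvKPT = (pvPitches events).flatMap (pvBucket events) := by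
  apply pvPairwiseFilterExt pvKPT
  · exact PySem.List.sorted_pairwise events pvKPT
  · exact pvFlatMap_pairwise (pvPitches events) (pvBucket events) (pvPitches_lt events)
      (pvBucket_pitch events)
      (fun p => by rw [pvBucket]; exact PySem.List.sorted_pairwise _ _)
  · intro c
    rw [pvSorted_filter]
    have hq : ∀ e, (decide (pvKPT e = c)) = true → e.2.1 = (ofLex c).1 := by
      intro e he
      have : pvKPT e = c := of_decide_eq_true he
      rw [pvKPT] at this
      rw [← this]
      rfl
    rw [pvFilter_flatMap (pvPitches events) (pvBucket events) _ ((ofLex c).1) hq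
      (fun p _ => pvBucket_pitch events p) (pvPitches_nodup events)]
    by_cases hmem : (ofLex c).1 ∈ pvPitches events
    · rw [if_pos hmem]
      have hcongr : (pvBucket events ((ofLex c).1)).filter (fun e => decide (pvKPT e = c)) =
          (pvBucket events ((ofLex c).1)).filter
            (fun e => decide ((fun x : Int × Int × Int × Int × String => x.1) e = (ofLex c).2)) := by
        apply List.filter_congr
        intro e he
        have hpe := pvBucket_pitch events ((ofLex c).1) e he
        apply decide_eq_decide.2
        constructor
        · intro h; rw [← h]; rfl
        · intro h
          have h' : e.1 = (ofLex c).2 := h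
          rw [pvKPT]
          have h2 : (e.2.1, e.1) = ofLex c := by rw [hpe, h']
          rw [h2]
          rfl
      rw [hcongr, pvBucket,
        pvSorted_filter (fun x : Int × Int × Int × Int × String => x.1)
          (events.filter (fun e => e.2.1 == (ofLex c).1)) ((ofLex c).2),
        List.filter_filter]
      apply List.filter_congr
      intro e _
      have hiff : pvKPT e = c ↔ (e.2.1 = (ofLex c).1 ∧ e.1 = (ofLex c).2) := by
        rw [pvKPT]
        constructor
        · intro h
          exact ⟨by rw [← h]; rfl, by rw [← h]; rfl⟩
        · rintro ⟨ha, hb⟩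
          rw [ha, hb]
          rfl
      by_cases h1 : e.2.1 = (ofLex c).1 <;> by_cases h2 : e.1 = (ofLex c).2 <;>
        simp [hiff, h1, h2]
    · rw [if_neg hmem]
      rw [List.filter_eq_nil_iff]
      intro e he hec
      exact hmem ((hq e hec) ▸ (pvPitches_mem events _).2 (List.mem_map.2 ⟨e, he, rfl⟩))

-- A's kept list is the merged blocks in pitch order
theorem pvKeptA (tw : Int) (events : List (Int × Int × Int × Int × String)) :
    ((PySem.List.sorted events pvKPT).foldl (pvStepA tw) []).reverse =
      (pvPitches events).flatMap (pvMerged tw events) := by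
  rw [pvSortPT_decomp]
  rw [pvFoldA_flatMap tw (pvPitches events) (pvBucket events) []
    (fun p hp => ⟨pvBucket_ne_nil events p hp, pvBucket_pitch events p⟩)
    (pvPitches_nodup events) (by intro h t ht; simp at ht)]
  simp only [List.append_nil, List.reverse_flatMap, List.reverse_reverse]
  rfl

-- B's run recursion computes the reversed pvStepH fold, on a tick-sorted homogeneous block
theorem pvRuns_eq_foldH (tw p : Int) :
    ∀ (l : List (Int × Int × Int × Int × String)) (tick endv vel : Int) (src : String)
      (acc : List (Int × Int × Int × Int × String)),
      (∀ x ∈ l, tick ≤ x.1) → (∀ x ∈ l, x.2.1 = p) → l.Pairwise (fun a b => a.1 ≤ b.1) →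
      (l.foldl (pvStepH tw) ((tick, p, endv - tick, vel, src) :: acc)).reverse =
        acc.reverse ++
          ((pvRun tw tick p endv vel src l).1 :: pvRuns tw (pvRun tw tick p endv vel src l).2) := by
  intro l
  induction l with
  | nil =>
    intro tick endv vel src acc _ _ _
    simp [pvRun, pvRuns]
  | cons x rest ih =>
    intro tick endv vel src acc hle hhom hsort
    by_cases hw : |x.1 - tick| < tw
    · have htx : tick ≤ x.1 := hle x List.mem_cons_self
      have hstep : pvStepH tw ((tick, p, endv - tick, vel, src) :: acc) x =
          (tick, p, max endv (x.1 + x.2.2.1) - tick, max vel x.2.2.2.1,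
            if src == "" then x.2.2.2.2 else src) :: acc := by
        have hx21 : x.2.1 = p := hhom x List.mem_cons_self
        have h3 : max (tick + (endv - tick)) (x.1 + x.2.2.1) = max endv (x.1 + x.2.2.1) := by
          omega
        simp only [pvStepH, hw, decide_true, if_true, hx21, min_eq_left htx, h3]
      have hrun : pvRun tw tick p endv vel src (x :: rest) =
          pvRun tw tick p (max endv (x.1 + x.2.2.1)) (max vel x.2.2.2.1)
            (if src == "" then x.2.2.2.2 else src) rest := by
        simp [pvRun, hw]
      simp only [List.foldl_cons, hstep, hrun]
      exact ih _ _ _ _ acc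
        (fun y hy => le_trans htx ((List.pairwise_cons.1 hsort).1 y hy))
        (fun y hy => hhom y (List.mem_cons_of_mem x hy))
        (List.pairwise_cons.1 hsort).2
    · have hstep : pvStepH tw ((tick, p, endv - tick, vel, src) :: acc) x =
          (x.1, p, (x.1 + x.2.2.1) - x.1, x.2.2.2.1, x.2.2.2.2) ::
            (tick, p, endv - tick, vel, src) :: acc := by
        simp only [pvStepH, hw, decide_false, Bool.false_eq_true, if_false]
        have hx21 : x.2.1 = p := hhom x List.mem_cons_self
        have hx : x = (x.1, p, (x.1 + x.2.2.1) - x.1, x.2.2.2.1, x.2.2.2.2) := by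
          have hd : (x.1 + x.2.2.1) - x.1 = x.2.2.1 := by omega
          rw [hd, ← hx21]
        exact congrArg (fun y => y :: (tick, p, endv - tick, vel, src) :: acc) hx
      have hrun : pvRun tw tick p endv vel src (x :: rest) =
          ((tick, p, endv - tick, vel, src), x :: rest) := by
        simp [pvRun, hw]
      have hruns : pvRuns tw (x :: rest) =
          (pvRun tw x.1 x.2.1 (x.1 + x.2.2.1) x.2.2.2.1 x.2.2.2.2 rest).1 ::
            pvRuns tw (pvRun tw x.1 x.2.1 (x.1 + x.2.2.1) x.2.2.2.1 x.2.2.2.2 rest).2 := by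
        rw [pvRuns]
      have hx21 : x.2.1 = p := hhom x List.mem_cons_self
      simp only [List.foldl_cons, hstep, hrun, hruns, hx21]
      have := ih x.1 (x.1 + x.2.2.1) x.2.2.2.1 x.2.2.2.2
        ((tick, p, endv - tick, vel, src) :: acc)
        (fun y hy => (List.pairwise_cons.1 hsort).1 y hy)
        (fun y hy => hhom y (List.mem_cons_of_mem x hy))
        (List.pairwise_cons.1 hsort).2
      rw [this]
      simp

theorem pvRuns_eq_merged (tw : Int) (events : List (Int × Int × Int × Int × String)) (p : Int) :
    pvRuns tw (pvBucket events p) = pvMerged tw events p := by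
  rw [pvMerged]
  cases hb : pvBucket events p with
  | nil => simp [pvRuns]
  | cons e rest =>
    have hhom : ∀ x ∈ e :: rest, x.2.1 = p := by
      rw [← hb]; exact pvBucket_pitch events p
    have hsort : (e :: rest).Pairwise (fun a b => a.1 ≤ b.1) := by
      rw [← hb, pvBucket]; exact PySem.List.sorted_pairwise _ _
    have hstep0 : pvStepH tw [] e = [(e.1, p, (e.1 + e.2.2.1) - e.1, e.2.2.2.1, e.2.2.2.2)] := by
      have he21 : e.2.1 = p := hhom e List.mem_cons_self
      have hd : (e.1 + e.2.2.1) - e.1 = e.2.2.1 := by omega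
      simp [pvStepH, hd, ← he21]
    have he21 : e.2.1 = p := hhom e List.mem_cons_self
    have := pvRuns_eq_foldH tw p rest e.1 (e.1 + e.2.2.1) e.2.2.2.1 e.2.2.2.2 []
      (fun y hy => (List.pairwise_cons.1 hsort).1 y hy)
      (fun y hy => hhom y (List.mem_cons_of_mem e hy))
      (List.pairwise_cons.1 hsort).2
    rw [pvRuns, he21]
    simp only [List.foldl_cons, hstep0]
    rw [this]
    simp

theorem pvMerged_pitch (tw : Int) (events : List (Int × Int × Int × Int × String)) (p : Int) :
    ∀ e ∈ pvMerged tw events p, e.2.1 = p := by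
  intro e he
  rw [pvMerged, List.mem_reverse] at he
  exact pvFoldH_pitch tw p (pvBucket events p) [] (pvBucket_pitch events p) (by simp) e he

-- B's pitch list is the first-occurrence dedup of the pitch column
theorem pvPitchesB (events : List (Int × Int × Int × Int × String)) :
    events.foldl (fun ps ev => PySem.Set.add ps ev.2.1) PySem.Set.empty =
      PySem.List.dedup (events.map (fun e => e.2.1)) := by
  rw [show (PySem.Set.empty : PySem.Set Int) = ([] : List Int) from rfl,
    ← PySem.Set.update_map_eq_foldl_add, PySem.Set.update_nil_left,
    PySem.List.dedup_eq_ofList]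

-- ===== VERDICT (by name: the statement is the Claim_ definition above) =====
theorem dedup_events_py_spec : Claim_equal_dedup_events_py := by
  intro events tick_window _
  unfold Spec_dedup_events_py
  simp only [dedup_events_py, dedup_events_py_alt, pvSorted2_eq]
  rw [show (fun e : Int × Int × Int × Int × String => toLex (e.2.1, e.1)) = pvKPT from rfl,
    show (fun e : Int × Int × Int × Int × String => toLex (e.1, e.2.1)) = pvKTP from rfl]
  rw [pvKeptA tick_window events, pvPitchesB events]
  have hbuckets : (PySem.List.dedup (events.map (fun e => e.2.1))).flatMap
      (fun p => pvRuns tick_window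
        (PySem.List.sorted (events.filter (fun e => e.2.1 == p)) (fun e => e.1))) =
      (PySem.List.dedup (events.map (fun e => e.2.1))).flatMap (pvMerged tick_window events) := by
    exact List.flatMap_congr (fun p _ => pvRuns_eq_merged tick_window events p)
  rw [hbuckets]
  apply pvPairwiseFilterExt pvKTP
  · exact PySem.List.sorted_pairwise _ _
  · exact PySem.List.sorted_pairwise _ _
  · intro c
    rw [pvSorted_filter, pvSorted_filter]
    have hq : ∀ e, (decide (pvKTP e = c)) = true → e.2.1 = (ofLex c).2 := by
      intro e he
      have h := of_decide_eq_true he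
      rw [pvKTP] at h
      rw [← h]
      rfl
    rw [pvFilter_flatMap _ _ _ ((ofLex c).2) hq
        (fun p _ => pvMerged_pitch tick_window events p) (pvPitches_nodup events),
      pvFilter_flatMap _ _ _ ((ofLex c).2) hq
        (fun p _ => pvMerged_pitch tick_window events p) (PySem.List.nodup_dedup _)]
    have hmemiff : ((ofLex c).2 ∈ pvPitches events) ↔
        (ofLex c).2 ∈ PySem.List.dedup (events.map (fun e => e.2.1)) := by
      rw [pvPitches_mem, PySem.List.mem_dedup]
    by_cases hm : (ofLex c).2 ∈ pvPitches events
    · rw [if_pos hm, if_pos (hmemiff.1 hm)]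
    · rw [if_neg hm, if_neg (fun h => hm (hmemiff.2 h))]
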